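-- pv_equiv track=rewrite | github.com/testxxxxxxxxx/python_coding_problems | main68.py | solution
-- ===== SOURCE A (Python) =====
-- def solution(numbers: list) -> int:
--
--     maxDenominator: int = 1
--     count: int = 0
--
--     for i in range(len(numbers)):
--
--         count = 0
--
--         for j in range(len(numbers)):
--
--             if numbers[j] % numbers[i] == 0:
--                 count += 1
--
--             if count == len(numbers):
--                 maxDenominator = numbers[i]
--
--     return maxDenominator
-- ===== SOURCE B (Python) =====
-- def solution(numbers: list) -> int:
--     g = 0
--     for x in numbers:
--         a = x if x >= 0 else -x
--         b = g
--         while b: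
--             a, b = b, a % b
--         g = a
--     result = 1
--     for x in numbers:
--         if g % x == 0:
--             result = x
--     return result
-- ===== Notes on version B (the rewrite author's own statement) =====
-- stated objective: faster
-- what changed: A tests every element against every candidate divisor in two nested index loops; B computes the gcd of all elements in one Euclid pass and then takes the last element that divides that gcd in a second single pass.
import Mathlib
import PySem

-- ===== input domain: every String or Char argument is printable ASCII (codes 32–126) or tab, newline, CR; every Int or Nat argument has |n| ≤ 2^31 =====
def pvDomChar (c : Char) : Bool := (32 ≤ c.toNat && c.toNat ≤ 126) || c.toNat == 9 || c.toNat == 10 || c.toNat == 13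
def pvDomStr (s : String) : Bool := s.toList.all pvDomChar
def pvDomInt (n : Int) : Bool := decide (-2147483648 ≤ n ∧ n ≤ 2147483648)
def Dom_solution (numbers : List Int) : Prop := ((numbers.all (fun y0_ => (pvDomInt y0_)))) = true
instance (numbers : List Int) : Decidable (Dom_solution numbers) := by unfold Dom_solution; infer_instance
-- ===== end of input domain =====

-- B replaces A's quadratic all-pairs divisibility scan by one gcd pass plus one
-- "last divisor of the gcd" pass (objective: faster).

-- ===== PORT A =====
-- A's inner-loop body: update (maxDenominator, count) for one element y against candidate d
def pvStepA (numbers : List Int) (d : Int) (s : Int × Int) (y : Int) : Int × Int :=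
  let c := if PySem.Int.mod y d = 0 then s.2 + 1 else s.2
  ((if c = (numbers.length : Int) then d else s.1), c)

def solution (numbers : List Int) : Int :=
  (PySem.List.pyRange 0 numbers.length 1).foldl
    (fun md i =>
      ((PySem.List.pyRange 0 numbers.length 1).foldl
        (fun s j => pvStepA numbers (PySem.List.pyGetD numbers i 0) s (PySem.List.pyGetD numbers j 0))
        (md, (0 : Int))).1)
    1

-- ===== PORT B =====
-- the hand-written Euclid while-loop of Source B ('while b: a, b = b, a % b')
def pvEuclid (a b : Int) : Int :=
  if hb0 : b = 0 then a else pvEuclid b (PySem.Int.mod a b)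
termination_by b.natAbs
decreasing_by
  rcases lt_trichotomy b 0 with hb | hb | hb
  · have := PySem.Int.mod_neg_bounds a hb; omega
  · exact absurd hb hb0
  · have h1 := PySem.Int.mod_nonneg a hb
    have h2 := PySem.Int.mod_lt a hb
    omega

def solution_alt (numbers : List Int) : Int :=
  let g := numbers.foldl (fun g x => pvEuclid (if 0 ≤ x then x else -x) g) 0
  numbers.foldl (fun r x => if PySem.Int.mod g x = 0 then x else r) 1

-- ===== PRECONDITION & SPEC =====
-- Pre_ excludes lists containing 0: there Python's 'numbers[j] % numbers[i]' raises ZeroDivisionError.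
def Pre_solution (numbers : List Int) : Prop := (0 : Int) ∉ numbers
instance (numbers : List Int) : Decidable (Pre_solution numbers) := by unfold Pre_solution; infer_instance
def pvWitness_solution : List Int := [12, 4, 8, 2, 4]

def Spec_solution (numbers : List Int) (out : Int) : Prop := out = solution_alt numbers
instance (numbers : List Int) (out : Int) : Decidable (Spec_solution numbers out) := by unfold Spec_solution; infer_instance

-- ===== CLAIM (what is proved, stated in full; the proofs are below) =====
def Claim_equal_solution : Prop := ∀ (numbers : List Int), Dom_solution numbers → Pre_solution numbers → Spec_solution numbers (solution numbers)

-- ===== LEMMAS AND PROOFS =====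

-- A's inner loop: with c + |l| ≤ n the count can reach n only at the very end,
-- so maxDenominator becomes d exactly when every element of a nonempty l is divisible by d.
theorem pv_inner (numbers : List Int) (d : Int) :
    ∀ (l : List Int) (md c : Int), c + l.length ≤ (numbers.length : Int) →
      (l.foldl (pvStepA numbers d) (md, c))
      = ((if c + (l.countP (fun y => decide (PySem.Int.mod y d = 0))) = (numbers.length : Int) ∧ l ≠ []
          then d else md),
         c + (l.countP (fun y => decide (PySem.Int.mod y d = 0)))) := by
  intro l
  induction l with
  | nil => intro md c _; simp
  | cons y t ih =>
    intro md c hle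
    have htc : t.countP (fun y => decide (PySem.Int.mod y d = 0)) ≤ t.length :=
      List.countP_le_length
    simp only [List.length_cons] at hle
    by_cases ht : t = []
    · subst ht
      by_cases hy : PySem.Int.mod y d = 0 <;>
        simp [pvStepA, hy]
    · have htl : 0 < t.length := List.length_pos_of_ne_nil ht
      have hc' : ∀ c' : Int, c' ≤ c + 1 → ¬ (c' = (numbers.length : Int)) := by
        intro c' h1 h2; omega
      by_cases hy : PySem.Int.mod y d = 0
      · simp only [List.foldl_cons, pvStepA, hy, if_true]
        rw [if_neg (hc' (c + 1) (le_refl _)), ih _ _ (by omega)]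
        simp only [List.countP_cons, hy, decide_true, ht, ne_eq, not_false_iff, and_true,
          List.cons_ne_nil]
        have hcast : (t.countP (fun y => decide (PySem.Int.mod y d = 0)) + if True then 1 else 0)
            = t.countP (fun y => decide (PySem.Int.mod y d = 0)) + 1 := by simp
        rw [hcast]
        have hcast2 : c + 1 + ((t.countP (fun y => decide (PySem.Int.mod y d = 0)) : Nat) : Int)
            = c + ((t.countP (fun y => decide (PySem.Int.mod y d = 0)) + 1 : Nat) : Int) := by
          push_cast; ring
        rw [hcast2]
      · simp only [List.foldl_cons, pvStepA, hy, if_false]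
        rw [if_neg (hc' c (by omega)), ih _ _ (by omega)]
        simp [hy, ht]
  -- (the two push_cast/omega steps reconcile the Nat-cast counts)

-- A as one pass over the list: keep the last element dividing every element.
theorem pv_A_shape (numbers : List Int) :
    solution numbers
      = numbers.foldl
          (fun md x =>
            if (numbers.countP (fun y => decide (PySem.Int.mod y x = 0))) = numbers.length
            then x else md) 1 := by
  unfold solution
  rw [PySem.List.foldl_pyRange_zero_pyGetD' numbers 0
      (fun md x =>
        ((PySem.List.pyRange 0 numbers.length 1).foldl
          (fun s j => pvStepA numbers x s (PySem.List.pyGetD numbers j 0))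
          (md, (0 : Int))).1) 1]
  apply PySem.List.foldl_congr_mem
  intro md x hx
  rw [PySem.List.foldl_pyRange_zero_pyGetD' numbers 0 (pvStepA numbers x) (md, 0)]
  rw [pv_inner numbers x numbers md 0 (by omega)]
  have hne : numbers ≠ [] := List.ne_nil_of_mem hx
  simp only [Int.zero_add, hne, ne_eq, not_false_iff, and_true]
  by_cases h : (numbers.countP (fun y => decide (PySem.Int.mod y x = 0))) = numbers.length
  · rw [if_pos h, if_pos (by exact_mod_cast h)]
  · rw [if_neg h, if_neg (by exact_mod_cast h)]

-- Source B's Euclid loop on nonnegative arguments is Nat.gcd.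
theorem pv_euclid_natCast : ∀ (b a : Nat), pvEuclid (a : Int) (b : Int) = (Nat.gcd b a : Int) := by
  intro b
  induction b using Nat.strong_induction_on with
  | _ b ih =>
    intro a
    rcases Nat.eq_zero_or_pos b with hb | hb
    · subst hb; rw [pvEuclid]; simp
    · rw [pvEuclid]
      have hbz : ((b : Int)) ≠ 0 := by exact_mod_cast Nat.pos_iff_ne_zero.mp hb
      rw [dif_neg hbz, PySem.Int.mod_natCast a b, ih (a % b) (Nat.mod_lt a hb)]
      rw [Nat.gcd_rec b a]

-- B's first loop computes the running Nat-gcd of the absolute values.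
theorem pv_gcd_fold (l : List Int) : ∀ (m : Nat),
    l.foldl (fun g x => pvEuclid (if 0 ≤ x then x else -x) g) (m : Int)
      = ((l.foldl (fun g x => Nat.gcd g x.natAbs) m : Nat) : Int) := by
  induction l with
  | nil => intro m; simp
  | cons x t ih =>
    intro m
    have habs : (if 0 ≤ x then x else -x) = ((x.natAbs : Nat) : Int) := by
      by_cases h : 0 ≤ x
      · rw [if_pos h]; omega
      · rw [if_neg h]; omega
    simp only [List.foldl_cons, habs, pv_euclid_natCast m x.natAbs]
    exact ih (Nat.gcd m x.natAbs)

-- divisors of the folded gcd are exactly the common divisors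
theorem pv_dvd_gcd_fold (x : Int) (l : List Int) : ∀ (m : Nat),
    (x ∣ ((l.foldl (fun g x => Nat.gcd g x.natAbs) m : Nat) : Int))
      ↔ (x ∣ (m : Int) ∧ ∀ y ∈ l, x ∣ y) := by
  have e : ∀ (k : Nat), (x ∣ (k : Int)) ↔ x.natAbs ∣ k := by
    intro k; rw [← Int.natAbs_dvd_natAbs]; simp
  induction l with
  | nil => intro m; simp
  | cons z t ih =>
    intro m
    simp only [List.foldl_cons, ih (Nat.gcd m z.natAbs), List.mem_cons]
    have hstep : (x ∣ ((Nat.gcd m z.natAbs : Nat) : Int)) ↔ (x ∣ (m : Int) ∧ x ∣ z) := by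
      rw [e, Nat.dvd_gcd_iff, ← e, ← e, Int.dvd_natAbs]
    constructor
    · rintro ⟨h, hall⟩
      exact ⟨(hstep.mp h).1, fun y hy => hy.elim (fun hyz => hyz ▸ (hstep.mp h).2) (hall y)⟩
    · rintro ⟨hm, hall⟩
      exact ⟨hstep.mpr ⟨hm, hall z (Or.inl rfl)⟩, fun y hy => hall y (Or.inr hy)⟩

-- ===== VERDICT (by name: the statement is the Claim_ definition above) =====
theorem solution_spec : Claim_equal_solution := by
  intro numbers _ _
  unfold Spec_solution solution_alt
  rw [pv_A_shape]
  have hg := pv_gcd_fold numbers 0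
  simp only [Nat.cast_zero] at hg
  rw [hg]
  apply PySem.List.foldl_congr_mem
  intro md x _
  have hiff :
      ((numbers.countP (fun y => decide (PySem.Int.mod y x = 0))) = numbers.length)
        ↔ (PySem.Int.mod ((numbers.foldl (fun g x => Nat.gcd g x.natAbs) 0 : Nat) : Int) x = 0) := by
    rw [PySem.Int.mod_eq_zero_iff_dvd, pv_dvd_gcd_fold x numbers 0]
    rw [List.countP_eq_length]
    constructor
    · intro h
      exact ⟨dvd_zero x, fun y hy => (PySem.Int.mod_eq_zero_iff_dvd y x).mp (by simpa using h y hy)⟩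
    · intro ⟨_, h⟩ y hy
      simpa using (PySem.Int.mod_eq_zero_iff_dvd y x).mpr (h y hy)
  by_cases h : (numbers.countP (fun y => decide (PySem.Int.mod y x = 0))) = numbers.length
  · rw [if_pos h, if_pos (hiff.mp h)]
  · rw [if_neg h, if_neg (fun hm => h (hiff.mpr hm))]
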